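-- pv_equiv track=rewrite | github.com/jyjww/algorithm | 프로그래머스/0/120891. 369게임/369게임.py | solution
-- ===== SOURCE A (Python) =====
-- def solution(order):
--     string = str(order)
--     num = ['3', '6', '9']
--     cnt = 0
--     for s in string:
--         if s in num:
--             cnt += 1
--     return cnt
-- ===== SOURCE B (Python) =====
-- def solution(order):
--     def go(n):
--         if n == 0:
--             return 0
--         q, d = divmod(n, 10)
--         return go(q) + (1 if d in (3, 6, 9) else 0)
--     return go(abs(order))
-- ===== Notes on version B (the rewrite author's own statement) =====
-- stated objective: alternative
-- what changed: B never builds a string: it recurses arithmetically on abs(order) with divmod(n, 10), counting remainders in {3,6,9}, instead of A's pass over the characters of str(order).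
import Mathlib
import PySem

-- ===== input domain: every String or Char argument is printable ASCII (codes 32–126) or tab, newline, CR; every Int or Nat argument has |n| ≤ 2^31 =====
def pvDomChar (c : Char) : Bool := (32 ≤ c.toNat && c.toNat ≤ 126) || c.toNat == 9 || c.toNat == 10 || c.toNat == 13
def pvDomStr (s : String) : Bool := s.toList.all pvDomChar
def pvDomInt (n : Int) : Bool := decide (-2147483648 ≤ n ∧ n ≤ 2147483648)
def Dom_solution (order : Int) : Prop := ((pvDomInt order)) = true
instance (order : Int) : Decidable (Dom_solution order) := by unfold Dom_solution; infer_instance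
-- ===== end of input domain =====

-- B never builds a string: it recurses arithmetically on abs(order) with divmod(n, 10),
-- counting remainders in {3,6,9}, instead of A's pass over the characters of str(order)
-- (alternative algorithm, same cost).

-- ===== PORT A =====
def solution (order : Int) : Int :=
  let string := PySem.Int.toStr order
  let num : List Char := ['3', '6', '9']
  string.toList.foldl (fun cnt s => if s ∈ num then cnt + 1 else cnt) 0

-- ===== PORT B =====
-- Source B's inner `go` recurses on a nonnegative Python int (abs(order)); ported on Nat,
-- where `/` and `%` agree exactly with Python's divmod on nonnegative operands.
def solutionAltGo (n : Nat) : Int :=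
  if n = 0 then 0
  else
    let q := n / 10
    let d := n % 10
    solutionAltGo q + (if d = 3 ∨ d = 6 ∨ d = 9 then 1 else 0)
decreasing_by exact Nat.div_lt_self (Nat.pos_of_ne_zero (by assumption)) (by omega)

def solution_alt (order : Int) : Int := solutionAltGo order.natAbs

-- ===== PRECONDITION & SPEC =====
def Spec_solution (order : Int) (out : Int) : Prop := out = solution_alt order
instance (order : Int) (out : Int) : Decidable (Spec_solution order out) := by unfold Spec_solution; infer_instance

-- ===== CLAIM (what is proved, stated in full; the proofs are below) =====
def Claim_equal_solution : Prop := ∀ (order : Int), Dom_solution order → Spec_solution order (solution order)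

-- ===== LEMMAS AND PROOFS =====

lemma go_eq (n : Nat) : solutionAltGo n =
    if n = 0 then 0
    else solutionAltGo (n / 10) + (if n % 10 = 3 ∨ n % 10 = 6 ∨ n % 10 = 9 then 1 else 0) := by
  rw [solutionAltGo]

lemma mem369_digitChar (m : Nat) (h : m < 10) :
    (decide (Nat.digitChar m ∈ (['3', '6', '9'] : List Char)))
      = decide (m = 3 ∨ m = 6 ∨ m = 9) := by
  interval_cases m <;> simp [Nat.digitChar]

lemma countP_cons_digitChar (m : Nat) (h : m < 10) (ds : List Char) :
    ((Nat.digitChar m :: ds).countP (fun c => decide (c ∈ (['3', '6', '9'] : List Char))) : Int)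
      = (if m = 3 ∨ m = 6 ∨ m = 9 then 1 else 0)
        + (ds.countP (fun c => decide (c ∈ (['3', '6', '9'] : List Char))) : Int) := by
  rw [List.countP_cons, mem369_digitChar m h]
  by_cases hd : m = 3 ∨ m = 6 ∨ m = 9
  · simp [hd]; ring
  · simp [hd]

-- counting {3,6,9} characters through Nat.toDigitsCore equals B's digit recursion
lemma countP_toDigitsCore (f : Nat) : ∀ (n : Nat) (ds : List Char), n < 10 ^ f →
    ((Nat.toDigitsCore 10 f n ds).countP (fun c => decide (c ∈ (['3', '6', '9'] : List Char))) : Int)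
      = solutionAltGo n + (ds.countP (fun c => decide (c ∈ (['3', '6', '9'] : List Char))) : Int) := by
  induction f with
  | zero =>
    intro n ds h
    have hn : n = 0 := by omega
    subst hn
    simp [Nat.toDigitsCore, go_eq]
  | succ f ih =>
    intro n ds h
    rw [Nat.toDigitsCore]
    by_cases hq : n / 10 = 0
    · rw [if_pos hq, countP_cons_digitChar (n % 10) (by omega)]
      by_cases hn0 : n = 0
      · subst hn0; simp [go_eq]
      · rw [go_eq n, if_neg hn0, hq, go_eq 0, if_pos rfl]
        ring
    · rw [if_neg hq]
      have hlt : n / 10 < 10 ^ f := by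
        have hmul : n < 10 * 10 ^ f := by rw [pow_succ] at h; omega
        exact Nat.div_lt_of_lt_mul hmul
      rw [ih (n / 10) _ hlt, countP_cons_digitChar (n % 10) (by omega),
        go_eq n, if_neg (by omega : ¬ n = 0)]
      ring

lemma countP_toDigits (n : Nat) :
    ((Nat.toDigits 10 n).countP (fun c => decide (c ∈ (['3', '6', '9'] : List Char))) : Int)
      = solutionAltGo n := by
  have h1 : n < 2 ^ n := Nat.lt_two_pow_self
  have h2 : 2 ^ n ≤ 10 ^ n := Nat.pow_le_pow_left (by norm_num) n
  have h3 : 10 ^ n ≤ 10 ^ (n + 1) := Nat.pow_le_pow_right (by norm_num) (by omega)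
  have := countP_toDigitsCore (n + 1) n [] (by omega)
  unfold Nat.toDigits
  simpa using this

-- ===== VERDICT (by name: the statement is the Claim_ definition above) =====
theorem solution_spec : Claim_equal_solution := by
  intro order _
  show solution order = solution_alt order
  unfold solution solution_alt
  simp only [PySem.Int.toList_toStr]
  rw [PySem.List.foldl_ite_add_one (fun c => c ∈ (['3', '6', '9'] : List Char))]
  unfold PySem.Int.toChars
  by_cases hneg : order < 0
  · rw [if_pos hneg, List.countP_cons]
    have hm : decide ('-' ∈ (['3', '6', '9'] : List Char)) = false := by decide
    rw [hm]
    simpa using countP_toDigits order.natAbs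
  · rw [if_neg hneg]
    have ht : order.toNat = order.natAbs := by omega
    rw [ht]
    simpa using countP_toDigits order.natAbs
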